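-- pv_equiv track=rewrite | github.com/QuBenhao/LeetCode | LCP/30/solution.py | magicTower
-- ===== SOURCE A (Python) =====
-- import heapq
--
-- def magicTower(nums):
--     """
--     :type nums: List[int]
--     :rtype: int
--     """
--     ans = remain = cur = 0
--     q = []
--     for num in nums:
--         cur += num
--         if num < 0:
--             heapq.heappush(q, num)
--             if cur < 0:
--                 ans += 1
--                 m = heapq.heappop(q)
--                 remain += m
--                 cur -= m
--     if cur + remain < 0:
--         return -1
--     return ans
-- ===== SOURCE B (Python) =====
-- def magicTower(nums):
--     """
--     :type nums: List[int]
--     :rtype: int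
--     """
--     if sum(nums) < 0:
--         return -1
--     deferred = set()  # indices of rooms postponed to the end of the trip
--     while True:
--         # rescan the whole dungeon from the start, skipping postponed rooms
--         cur = 0
--         pos = -1
--         for i, num in enumerate(nums):
--             if i in deferred:
--                 continue
--             cur += num
--             if cur < 0:
--                 pos = i
--                 break
--         if pos < 0:
--             return len(deferred)
--         # postpone the cheapest not-yet-postponed room of the failing prefix
--         best = -1
--         for i in range(pos + 1):
--             if i not in deferred and (best < 0 or nums[i] < nums[best]):
--                 best = i
--         deferred.add(best)
-- ===== Notes on version B (the rewrite author's own statement) =====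
-- stated objective: alternative
-- what changed: Replaces the single-pass heap greedy with a restart-based simulation: repeatedly rescan the dungeon from the start skipping a set of deferred room indices, and on each failing scan defer the argmin room of the failing prefix; no heap, no running remainder - the -1 case is decided up front by sum(nums).
import Mathlib
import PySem

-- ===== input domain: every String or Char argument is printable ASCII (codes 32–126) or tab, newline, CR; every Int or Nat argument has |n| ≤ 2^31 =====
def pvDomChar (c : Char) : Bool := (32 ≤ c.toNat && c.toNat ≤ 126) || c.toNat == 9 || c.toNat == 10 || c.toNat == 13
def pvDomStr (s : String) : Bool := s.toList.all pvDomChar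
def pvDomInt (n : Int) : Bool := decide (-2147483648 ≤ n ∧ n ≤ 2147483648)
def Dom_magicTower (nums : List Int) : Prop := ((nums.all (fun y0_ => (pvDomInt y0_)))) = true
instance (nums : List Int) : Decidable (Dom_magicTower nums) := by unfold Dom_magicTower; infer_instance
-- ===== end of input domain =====

-- B replaces A's single-pass heap greedy by a restart-based simulation: rescan the dungeon
-- from the start with a set of deferred room indices, each failing scan deferring the
-- cheapest room of its failing prefix; same return value, different algorithm.

-- ===== PORT A =====
-- heapq is modelled by its priority-queue contract: heappush = append to the backing list,
-- heappop = remove-and-return the minimum element (PySem.List.min?, first extremal; the heap's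
-- result only depends on the multiset of stored elements, so this is exact for the returned value).
def magicTowerStep (s : Int × Int × Int × List Int) (num : Int) : Int × Int × Int × List Int :=
  let ans := s.1
  let remain := s.2.1
  let cur := s.2.2.1 + num
  let q := s.2.2.2
  if num < 0 then
    let q := q ++ [num]                          -- heapq.heappush(q, num)
    if cur < 0 then
      let m := (PySem.List.min? q (fun x => x)).getD 0   -- m = heapq.heappop(q) …
      (ans + 1, remain + m, cur - m, q.erase m)          -- … removes one minimal element
    else
      (ans, remain, cur, q)
  else
    (ans, remain, cur, q)

def magicTower (nums : List Int) : Int :=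
  let s := nums.foldl magicTowerStep (0, 0, 0, [])
  if s.2.2.1 + s.2.1 < 0 then -1 else s.1

-- ===== PORT B =====
-- the `for i, num in enumerate(nums)` scan with continue/break: first index where the
-- running sum of the non-deferred rooms goes negative (none = the whole scan stays ≥ 0)
def bScan : List Int → List Nat → Int → Nat → Option Nat
  | [], _, _, _ => none
  | num :: rest, deferred, cur, i =>
    if i ∈ deferred then bScan rest deferred cur (i + 1)
    else if cur + num < 0 then some i else bScan rest deferred (cur + num) (i + 1)

-- one step of the `for i in range(pos+1)` argmin loop; Python's best = -1 sentinel is `none`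
-- (indices are always in range, so nums[i] is List.getD)
def bBestStep (nums : List Int) (deferred : List Nat) (best : Option Nat) (i : Nat) : Option Nat :=
  match best with
  | none => if i ∈ deferred then none else some i
  | some b =>
    if i ∉ deferred ∧ nums.getD i 0 < nums.getD b 0 then some i else some b

-- the `while True` loop; fuel (= len(nums)+1, an upper bound on the number of iterations,
-- since each one defers a fresh index < len(nums)) is only a totality guard
def bLoop : Nat → List Int → List Nat → Int
  | 0, _, deferred => (deferred.length : Int)
  | fuel + 1, nums, deferred =>
    match bScan nums deferred 0 0 with
    | none => (deferred.length : Int)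
    | some pos =>
      match (List.range (pos + 1)).foldl (bBestStep nums deferred) none with
      | none => (deferred.length : Int)   -- unreachable: the failing index pos is never deferred
      | some best => bLoop fuel nums (PySem.Set.add deferred best)

def magicTower_alt (nums : List Int) : Int :=
  if nums.sum < 0 then -1
  else bLoop (nums.length + 1) nums []

-- ===== PRECONDITION & SPEC =====
def Spec_magicTower (nums : List Int) (out : Int) : Prop := out = magicTower_alt nums
instance (nums : List Int) (out : Int) : Decidable (Spec_magicTower nums out) := by unfold Spec_magicTower; infer_instance

-- ===== CLAIM (what is proved, stated in full; the proofs are below) =====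
def Claim_equal_magicTower : Prop := ∀ (nums : List Int), Dom_magicTower nums → Spec_magicTower nums (magicTower nums)

-- ===== LEMMAS AND PROOFS =====

-- the final running sum of a non-failing scan (the scan's carry)
def mres : List Int → List Nat → Int → Nat → Int
  | [], _, cur, _ => cur
  | num :: rest, deferred, cur, i =>
    if i ∈ deferred then mres rest deferred cur (i + 1)
    else mres rest deferred (cur + num) (i + 1)

-- values of the non-deferred negative positions, in order (A's heap as a multiset)
def ndNegs : List Int → List Nat → Nat → List Int
  | [], _, _ => []
  | num :: rest, deferred, i =>
    if i ∉ deferred ∧ num < 0 then num :: ndNegs rest deferred (i + 1)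
    else ndNegs rest deferred (i + 1)

theorem mres_shift (xs : List Int) : ∀ (D : List Nat) (cur : Int) (i : Nat),
    mres xs D cur i = cur + mres xs D 0 i := by
  induction xs with
  | nil => intro D cur i; simp [mres]
  | cons x r ih =>
    intro D cur i
    by_cases h : i ∈ D
    · simp only [mres, h, if_true]
      exact ih D cur (i+1)
    · simp only [mres, h, if_false]
      rw [ih D (cur + x) (i+1), ih D (0 + x) (i+1)]
      ring


theorem bScan_mono (xs : List Int) : ∀ (D : List Nat) (cur cur' : Int) (i : Nat),
    cur ≤ cur' → bScan xs D cur i = none → bScan xs D cur' i = none := by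
  induction xs with
  | nil => intro D cur cur' i _ _; rfl
  | cons x r ih =>
    intro D cur cur' i hle h
    simp only [bScan] at h ⊢
    by_cases hd : i ∈ D
    · simp only [hd, if_true] at h ⊢; exact ih D cur cur' (i+1) hle h
    · simp only [hd, if_false] at h ⊢
      by_cases hc : cur + x < 0
      · simp [hc] at h
      · have hc' : ¬ (cur' + x < 0) := by omega
        simp only [hc, if_false] at h
        simp only [hc', if_false]
        exact ih D (cur + x) (cur' + x) (i+1) (by omega) h


theorem mres_pos (xs : List Int) : ∀ (D : List Nat) (cur : Int) (i : Nat),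
    0 ≤ cur → bScan xs D cur i = none → 0 ≤ mres xs D cur i := by
  induction xs with
  | nil => intro D cur i h _; simpa [mres] using h
  | cons x r ih =>
    intro D cur i h hs
    simp only [bScan] at hs
    simp only [mres]
    by_cases hd : i ∈ D
    · simp only [hd, if_true] at hs ⊢; exact ih D cur (i+1) h hs
    · simp only [hd, if_false] at hs ⊢
      by_cases hc : cur + x < 0
      · simp [hc] at hs
      · simp only [hc, if_false] at hs
        exact ih D (cur + x) (i+1) (by omega) hs


-- congruence: changing deferred outside the scanned index window changes nothing
theorem bScan_congr (xs : List Int) : ∀ (D D' : List Nat) (cur : Int) (i : Nat),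
    (∀ j, i ≤ j → j < i + xs.length → (j ∈ D' ↔ j ∈ D)) →
    bScan xs D' cur i = bScan xs D cur i := by
  induction xs with
  | nil => intro D D' cur i _; rfl
  | cons x r ih =>
    intro D D' cur i h
    have hi : (i ∈ D') ↔ (i ∈ D) := h i (le_refl _) (by simp)
    simp only [bScan]
    by_cases hd : i ∈ D
    · simp only [hd, hi.mpr hd, if_true]
      exact ih D D' cur (i+1) (fun j h1 h2 => h j (by omega) (by simp at h2 ⊢; omega))
    · have hd' : i ∉ D' := fun hc => hd (hi.mp hc)
      simp only [hd, hd', if_false]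
      by_cases hc : cur + x < 0
      · simp [hc]
      · simp only [hc, if_false]
        exact ih D D' (cur + x) (i+1) (fun j h1 h2 => h j (by omega) (by simp at h2 ⊢; omega))


theorem mres_congr (xs : List Int) : ∀ (D D' : List Nat) (cur : Int) (i : Nat),
    (∀ j, i ≤ j → j < i + xs.length → (j ∈ D' ↔ j ∈ D)) →
    mres xs D' cur i = mres xs D cur i := by
  induction xs with
  | nil => intro D D' cur i _; rfl
  | cons x r ih =>
    intro D D' cur i h
    have hi : (i ∈ D') ↔ (i ∈ D) := h i (le_refl _) (by simp)
    simp only [mres]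
    by_cases hd : i ∈ D
    · simp only [hd, hi.mpr hd, if_true]
      exact ih D D' cur (i+1) (fun j h1 h2 => h j (by omega) (by simp at h2 ⊢; omega))
    · have hd' : i ∉ D' := fun hc => hd (hi.mp hc)
      simp only [hd, hd', if_false]
      exact ih D D' (cur + x) (i+1) (fun j h1 h2 => h j (by omega) (by simp at h2 ⊢; omega))


theorem ndNegs_congr (xs : List Int) : ∀ (D D' : List Nat) (i : Nat),
    (∀ j, i ≤ j → j < i + xs.length → (j ∈ D' ↔ j ∈ D)) →
    ndNegs xs D' i = ndNegs xs D i := by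
  induction xs with
  | nil => intro D D' i _; rfl
  | cons x r ih =>
    intro D D' i h
    have hi : (i ∈ D') ↔ (i ∈ D) := h i (le_refl _) (by simp)
    have hrec := ih D D' (i+1) (fun j h1 h2 => h j (by omega) (by simp at h2 ⊢; omega))
    simp only [ndNegs]
    by_cases hd : i ∈ D
    · have hd' : i ∈ D' := hi.mpr hd
      simp [hd, hd', hrec]
    · have hd' : i ∉ D' := fun hc => hd (hi.mp hc)
      simp [hd, hd', hrec]


theorem bScan_append_none (xs ys : List Int) : ∀ (D : List Nat) (cur : Int) (i : Nat),
    bScan xs D cur i = none →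
    bScan (xs ++ ys) D cur i = bScan ys D (mres xs D cur i) (i + xs.length) := by
  induction xs with
  | nil => intro D cur i _; simp [mres]
  | cons x r ih =>
    intro D cur i h
    simp only [bScan, mres, List.cons_append] at h ⊢
    by_cases hd : i ∈ D
    · simp only [hd, if_true] at h ⊢
      rw [ih D cur (i+1) h]; ring_nf
      congr 1; simp [List.length_cons]; omega
    · simp only [hd, if_false] at h ⊢
      by_cases hc : cur + x < 0
      · simp [hc] at h
      · simp only [hc, if_false] at h ⊢
        rw [ih D (cur + x) (i+1) h]
        congr 1; simp [List.length_cons]; omega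


theorem mres_append (xs ys : List Int) : ∀ (D : List Nat) (cur : Int) (i : Nat),
    mres (xs ++ ys) D cur i = mres ys D (mres xs D cur i) (i + xs.length) := by
  induction xs with
  | nil => intro D cur i; simp [mres]
  | cons x r ih =>
    intro D cur i
    simp only [mres, List.cons_append]
    by_cases hd : i ∈ D
    · simp only [hd, if_true]
      rw [ih D cur (i+1)]
      congr 1; simp [List.length_cons]; omega
    · simp only [hd, if_false]
      rw [ih D (cur + x) (i+1)]
      congr 1; simp [List.length_cons]; omega


theorem ndNegs_append (xs ys : List Int) : ∀ (D : List Nat) (i : Nat),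
    ndNegs (xs ++ ys) D i = ndNegs xs D i ++ ndNegs ys D (i + xs.length) := by
  induction xs with
  | nil => intro D i; simp [ndNegs]
  | cons x r ih =>
    intro D i
    simp only [ndNegs, List.cons_append]
    have := ih D (i+1)
    by_cases hd : i ∈ D
    · simp only [hd, not_true, false_and, if_false, this]
      congr 2; simp [List.length_cons]; omega
    · by_cases hx : x < 0
      · simp only [hd, not_false_iff, hx, and_self, if_true, this, List.cons_append]
        congr 3; simp [List.length_cons]; omega
      · simp only [hd, hx, and_false, if_false, this]
        congr 2; simp [List.length_cons]; omega


-- adding one in-window, non-positive deferred index keeps a non-failing scan non-failing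
-- and raises its carry by the removed value
theorem bScan_add (b : Nat) (xs : List Int) : ∀ (D : List Nat) (cur : Int) (i : Nat),
    bScan xs D cur i = none → i ≤ b → b < i + xs.length → b ∉ D → xs.getD (b - i) 0 ≤ 0 →
    bScan xs (D ++ [b]) cur i = none ∧
      mres xs (D ++ [b]) cur i = mres xs D cur i - xs.getD (b - i) 0 := by
  induction xs with
  | nil => intro D cur i _ h1 h2; simp at h2; omega
  | cons x r ih =>
    intro D cur i h hib hlt hbD hval
    have hmem : ∀ j, j ∈ D ++ [b] ↔ (j ∈ D ∨ j = b) := by intro j; simp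
    simp only [bScan, mres] at h ⊢
    by_cases hd : i ∈ D
    · have hib' : i ≠ b := fun he => hbD (he ▸ hd)
      have hd' : i ∈ D ++ [b] := by simp [hd]
      simp only [hd, hd', if_true] at h ⊢
      have hb1 : i + 1 ≤ b := by omega
      have := ih D cur (i+1) h hb1 (by simp [List.length_cons] at hlt ⊢; omega) hbD
        (by have : b - i = (b - (i+1)) + 1 := by omega
            simpa [this] using hval)
      refine ⟨this.1, ?_⟩
      rw [this.2]
      congr 1
      have : b - i = (b - (i+1)) + 1 := by omega
      simp [this]
    · by_cases heq : i = b
      · subst heq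
        have hd' : i ∈ D ++ [i] := by simp
        simp only [hd, if_false] at h ⊢
        simp only [hd', if_true]
        by_cases hc : cur + x < 0
        · simp [hc] at h
        · simp only [hc, if_false] at h
          have hnone : bScan r D cur (i+1) = none :=
            bScan_mono r D (cur + x) cur (i+1) (by simpa using hval) h
          have hco : ∀ j, i + 1 ≤ j → j < i + 1 + r.length → (j ∈ D ++ [i] ↔ j ∈ D) := by
            intro j h1 _; simp; omega
          constructor
          · rw [bScan_congr r D (D ++ [i]) cur (i+1) hco]; exact hnone
          · rw [mres_congr r D (D ++ [i]) cur (i+1) hco]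
            rw [mres_shift r D cur (i+1), mres_shift r D (cur + x) (i+1)]
            have hgx : (x :: r).getD (i - i) 0 = x := by simp
            rw [hgx]; ring
      · have hd' : i ∉ D ++ [b] := by simp [hd, heq]
        simp only [hd, hd', if_false] at h ⊢
        by_cases hc : cur + x < 0
        · simp [hc] at h
        · simp only [hc, if_false] at h ⊢
          have hb1 : i + 1 ≤ b := by omega
          have := ih D (cur + x) (i+1) h hb1 (by simp [List.length_cons] at hlt ⊢; omega) hbD
            (by have : b - i = (b - (i+1)) + 1 := by omega
                simpa [this] using hval)
          refine ⟨this.1, ?_⟩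
          rw [this.2]
          congr 1
          have : b - i = (b - (i+1)) + 1 := by omega
          simp [this]


-- membership description of ndNegs
theorem ndNegs_mem (xs : List Int) : ∀ (D : List Nat) (i : Nat) (v : Int),
    v ∈ ndNegs xs D i → ∃ j, i ≤ j ∧ j < i + xs.length ∧ j ∉ D ∧ xs.getD (j - i) 0 = v ∧ v < 0 := by
  induction xs with
  | nil => intro D i v h; simp [ndNegs] at h
  | cons x r ih =>
    intro D i v h
    simp only [ndNegs] at h
    by_cases hd : i ∉ D ∧ x < 0
    · rw [if_pos hd] at h
      rcases List.mem_cons.mp h with rfl | h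
      · exact ⟨i, le_refl _, by simp, hd.1, by simp, hd.2⟩
      · obtain ⟨j, h1, h2, h3, h4, h5⟩ := ih D (i+1) v h
        refine ⟨j, by omega, by simp [List.length_cons]; omega, h3, ?_, h5⟩
        have : j - i = (j - (i+1)) + 1 := by omega
        simpa [this] using h4
    · rw [if_neg hd] at h
      obtain ⟨j, h1, h2, h3, h4, h5⟩ := ih D (i+1) v h
      refine ⟨j, by omega, by simp [List.length_cons]; omega, h3, ?_, h5⟩
      have : j - i = (j - (i+1)) + 1 := by omega
      simpa [this] using h4


theorem ndNegs_mem' (xs : List Int) : ∀ (D : List Nat) (i j : Nat),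
    i ≤ j → j < i + xs.length → j ∉ D → xs.getD (j - i) 0 < 0 →
    xs.getD (j - i) 0 ∈ ndNegs xs D i := by
  induction xs with
  | nil => intro D i j _ h2; simp at h2; omega
  | cons x r ih =>
    intro D i j h1 h2 h3 h4
    simp only [ndNegs]
    by_cases heq : i = j
    · subst heq
      simp only [Nat.sub_self, List.getD] at h4 ⊢
      simp only [List.getElem?_cons_zero] at h4 ⊢
      simp only [Option.getD_some] at h4 ⊢
      simp [h3, h4]
    · have h1' : i + 1 ≤ j := by omega
      have hji : j - i = (j - (i+1)) + 1 := by omega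
      have h4' : r.getD (j - (i+1)) 0 < 0 := by simpa [hji] using h4
      have hrec := ih D (i+1) j h1' (by simp [List.length_cons] at h2 ⊢; omega) h3 h4'
      have hgoal : (x :: r).getD (j - i) 0 = r.getD (j - (i+1)) 0 := by simp [hji]
      rw [hgoal]
      by_cases hd : i ∉ D ∧ x < 0
      · rw [if_pos hd]
        exact List.mem_cons_of_mem _ hrec
      · rw [if_neg hd]
        exact hrec


-- removing one non-deferred negative position from the mask splits off its value
theorem ndNegs_split (b : Nat) (xs : List Int) : ∀ (D : List Nat) (i : Nat),
    i ≤ b → b < i + xs.length → b ∉ D → xs.getD (b - i) 0 < 0 →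
    (ndNegs xs D i).Perm (xs.getD (b - i) 0 :: ndNegs xs (D ++ [b]) i) := by
  induction xs with
  | nil => intro D i _ h2; simp at h2; omega
  | cons x r ih =>
    intro D i h1 h2 h3 h4
    have hmem : ∀ j, j ∈ D ++ [b] ↔ (j ∈ D ∨ j = b) := by intro j; simp
    simp only [ndNegs]
    by_cases heq : i = b
    · subst heq
      have hx : x < 0 := by simpa using h4
      have hvx : (x :: r).getD (i - i) 0 = x := by simp
      rw [hvx]
      have hiD' : ¬ (i ∉ D ++ [i] ∧ x < 0) := by simp
      rw [if_pos (show i ∉ D ∧ x < 0 from ⟨h3, hx⟩), if_neg hiD']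
      have hco : ∀ j, i + 1 ≤ j → j < i + 1 + r.length → (j ∈ D ++ [i] ↔ j ∈ D) := by
        intro j hj _; simp; omega
      rw [ndNegs_congr r D (D ++ [i]) (i+1) hco]
    · have h1' : i + 1 ≤ b := by omega
      have hbi : b - i = (b - (i+1)) + 1 := by omega
      have h4' : r.getD (b - (i+1)) 0 < 0 := by simpa [hbi] using h4
      have hrec := ih D (i+1) h1' (by simp [List.length_cons] at h2 ⊢; omega) h3 h4'
      have hgd : (x :: r).getD (b - i) 0 = r.getD (b - (i+1)) 0 := by simp [hbi]
      rw [hgd]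
      have hiDb : (i ∈ D ++ [b]) ↔ i ∈ D := by simp; omega
      by_cases hd : i ∉ D ∧ x < 0
      · have hd' : i ∉ D ++ [b] ∧ x < 0 := ⟨by simp [hd.1]; omega, hd.2⟩
        rw [if_pos hd, if_pos hd']
        exact (hrec.cons x).trans (List.Perm.swap _ _ _)
      · have hd' : ¬ (i ∉ D ++ [b] ∧ x < 0) := by
          intro hc; exact hd ⟨fun hm => hc.1 (by simp [hm]), hc.2⟩
        rw [if_neg hd, if_neg hd']
        exact hrec


-- the argmin loop: if some index < n is not deferred, it returns the first argmin
theorem bBest_spec (nums : List Int) (D : List Nat) : ∀ (n : Nat),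
    ((List.range n).foldl (bBestStep nums D) none = none → ∀ i, i < n → i ∈ D) ∧
    (∀ b, (List.range n).foldl (bBestStep nums D) none = some b →
      b < n ∧ b ∉ D ∧ ∀ i, i < n → i ∉ D → nums.getD b 0 ≤ nums.getD i 0) := by
  intro n
  induction n with
  | zero => exact ⟨fun _ i hi => absurd hi (by omega), fun b hb => by simp [List.range_zero] at hb⟩
  | succ n ih =>
    have hstep : (List.range (n+1)).foldl (bBestStep nums D) none
        = bBestStep nums D ((List.range n).foldl (bBestStep nums D) none) n := by
      rw [List.range_succ, List.foldl_append, List.foldl_cons, List.foldl_nil]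
    constructor
    · intro h i hi
      rw [hstep] at h
      cases hp : (List.range n).foldl (bBestStep nums D) none with
      | none =>
        rw [hp] at h
        simp only [bBestStep] at h
        by_cases hn : n ∈ D
        · rcases Nat.lt_succ_iff_lt_or_eq.mp hi with hlt | rfl
          · exact (ih.1 hp) i hlt
          · exact hn
        · simp [hn] at h
      | some b => rw [hp] at h; simp only [bBestStep] at h; split at h <;> simp at h
    · intro b hb
      rw [hstep] at hb
      cases hp : (List.range n).foldl (bBestStep nums D) none with
      | none =>
        rw [hp] at hb
        simp only [bBestStep] at hb
        by_cases hn : n ∈ D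
        · simp [hn] at hb
        · simp only [hn, if_false] at hb
          have hbn : b = n := by simpa using hb.symm
          subst hbn
          refine ⟨by omega, hn, fun i hi hiD => ?_⟩
          rcases Nat.lt_succ_iff_lt_or_eq.mp hi with hlt | rfl
          · exact absurd (ih.1 hp i hlt) hiD
          · exact le_refl _
      | some c =>
        rw [hp] at hb
        obtain ⟨hc1, hc2, hc3⟩ := ih.2 c hp
        simp only [bBestStep] at hb
        by_cases hcond : n ∉ D ∧ nums.getD n 0 < nums.getD c 0
        · rw [if_pos hcond] at hb
          have hbn : b = n := by simpa using hb.symm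
          subst hbn
          refine ⟨by omega, hcond.1, fun i hi hiD => ?_⟩
          rcases Nat.lt_succ_iff_lt_or_eq.mp hi with hlt | rfl
          · exact le_of_lt (lt_of_lt_of_le hcond.2 (hc3 i hlt hiD))
          · exact le_refl _
        · rw [if_neg hcond] at hb
          have hbc : b = c := by simpa using hb.symm
          subst hbc
          refine ⟨by omega, hc2, fun i hi hiD => ?_⟩
          rcases Nat.lt_succ_iff_lt_or_eq.mp hi with hlt | rfl
          · exact hc3 i hlt hiD
          · by_cases hlt2 : nums.getD i 0 < nums.getD b 0
            · exact absurd ⟨hiD, hlt2⟩ hcond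
            · omega


-- A's cur + remain is the plain prefix sum
theorem currem (xs : List Int) : ∀ (s : Int × Int × Int × List Int),
    (xs.foldl magicTowerStep s).2.2.1 + (xs.foldl magicTowerStep s).2.1
      = s.2.2.1 + s.2.1 + xs.sum := by
  induction xs with
  | nil => intro s; simp
  | cons x r ih =>
    intro s
    obtain ⟨ans, rem, cur, q⟩ := s
    rw [List.foldl_cons]
    rw [ih (magicTowerStep (ans, rem, cur, q) x)]
    simp only [magicTowerStep, List.sum_cons]
    split_ifs <;> simp <;> ring


-- the master simulation invariant: A resumed after prefix `pre` with deferred multiset D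
-- computes the same count as B's restart loop
theorem main_lemma : ∀ (rest pre : List Int) (D : List Nat) (q : List Int) (fuel : Nat),
    (∀ j ∈ D, j < pre.length) → D.Nodup → bScan pre D 0 0 = none →
    q.Perm (ndNegs pre D 0) →
    rest.length + 1 ≤ fuel →
    (rest.foldl magicTowerStep
        ((D.length : Int), pre.sum - mres pre D 0 0, mres pre D 0 0, q)).1
      = bLoop fuel (pre ++ rest) D := by
  intro rest
  induction rest with
  | nil =>
    intro pre D q fuel hI1 hnd hI3 hq hfuel
    cases fuel with
    | zero => exact absurd hfuel (by omega)
    | succ f => simp [bLoop, hI3]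
  | cons x rest₂ ih =>
    intro pre D q fuel hI1 hnd hI3 hq hfuel
    have hcur0 : 0 ≤ mres pre D 0 0 := mres_pos pre D 0 0 (le_refl 0) hI3
    have hposD : pre.length ∉ D := fun h => lt_irrefl _ (hI1 _ h)
    rw [List.foldl_cons]
    by_cases hx : mres pre D 0 0 + x < 0
    · -- A defers here; B's scan fails at pos = pre.length
      have hxneg : x < 0 := by omega
      cases fuel with
      | zero => exact absurd hfuel (by omega)
      | succ f =>
      have hscanS : bScan (pre ++ x :: rest₂) D 0 0 = some pre.length := by
        rw [bScan_append_none pre (x :: rest₂) D 0 0 hI3]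
        simp [bScan, hposD, hx]
      cases hmin : PySem.List.min? (q ++ [x]) (fun y => y) with
      | none =>
        rw [PySem.List.min?_eq_none_iff] at hmin
        simp at hmin
      | some a =>
      have hq1 : (q ++ [x]).Perm (ndNegs (pre ++ [x]) D 0) := by
        rw [ndNegs_append]
        have : ndNegs [x] D (0 + pre.length) = [x] := by
          simp [ndNegs, hposD, hxneg]
        rw [this]
        exact List.Perm.append hq (List.Perm.refl [x])
      have hbb := bBest_spec (pre ++ x :: rest₂) D (pre.length + 1)
      cases hR : (List.range (pre.length + 1)).foldl (bBestStep (pre ++ x :: rest₂) D) none with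
      | none => exact absurd (hbb.1 hR pre.length (by omega)) hposD
      | some b =>
      obtain ⟨hb1, hb2, hb3⟩ := hbb.2 b hR
      -- the popped heap value a equals B's chosen room value nums[b]
      have hpre' : pre ++ x :: rest₂ = (pre ++ [x]) ++ rest₂ := by simp
      have hlenp : (pre ++ [x]).length = pre.length + 1 := by simp
      have hgetp : ∀ j, j < pre.length + 1 →
          (pre ++ x :: rest₂).getD j 0 = (pre ++ [x]).getD j 0 := by
        intro j hj
        rw [hpre', List.getD_append]
        omega
      have hamem : a ∈ ndNegs (pre ++ [x]) D 0 :=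
        (hq1.mem_iff).mp (PySem.List.min?_mem hmin)
      obtain ⟨j, hj0, hjlt, hjD, hjval, haneg⟩ := ndNegs_mem (pre ++ [x]) D 0 a hamem
      have hjval' : (pre ++ x :: rest₂).getD j 0 = a := by
        rw [hgetp j (by omega)]
        simpa using hjval
      have hba : (pre ++ x :: rest₂).getD b 0 ≤ a := by
        rw [← hjval']
        exact hb3 j (by omega) hjD
      have hmBneg : (pre ++ x :: rest₂).getD b 0 < 0 := lt_of_le_of_lt hba haneg
      have hmBmem : (pre ++ x :: rest₂).getD b 0 ∈ ndNegs (pre ++ [x]) D 0 := by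
        have := ndNegs_mem' (pre ++ [x]) D 0 b (by omega) (by omega) hb2
          (by rw [Nat.sub_zero, ← hgetp b (by omega)]; exact hmBneg)
        rw [Nat.sub_zero] at this
        rw [hgetp b (by omega)]
        exact this
      have hab : a ≤ (pre ++ x :: rest₂).getD b 0 :=
        PySem.List.min?_isMin hmin _ ((hq1.mem_iff).mpr hmBmem)
      have haeq : a = (pre ++ x :: rest₂).getD b 0 := le_antisymm hab hba
      -- value at the failing position itself
      have hgpos : (pre ++ x :: rest₂).getD pre.length 0 = x := by
        rw [List.getD_append_right pre (x :: rest₂) 0 pre.length (le_refl _)]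
        simp
      have hmBx : (pre ++ x :: rest₂).getD b 0 ≤ x := by
        have h := hb3 pre.length (by omega) hposD
        rw [hgpos] at h
        exact h
      -- new deferred set invariants
      have hI1' : ∀ j ∈ D ++ [b], j < (pre ++ [x]).length := by
        intro j hj
        rcases List.mem_append.mp hj with hj | hj
        · have := hI1 j hj; omega
        · simp at hj; omega
      have hnd' : (D ++ [b]).Nodup := by
        simp [List.nodup_append, hnd]
        intro y hy hyb
        exact hb2 (hyb ▸ hy)
      have hscan' : bScan (pre ++ [x]) (D ++ [b]) 0 0 = none ∧
          mres (pre ++ [x]) (D ++ [b]) 0 0 = mres pre D 0 0 + x - a := by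
        by_cases hbp : b = pre.length
        · have hax : a = x := by rw [haeq, hbp, hgpos]
          have hco : ∀ j, 0 ≤ j → j < 0 + pre.length → (j ∈ D ++ [b] ↔ j ∈ D) := by
            intro j _ hjl; simp; omega
          have hbmem : pre.length ∈ D ++ [b] := by rw [← hbp]; simp
          constructor
          · rw [bScan_append_none pre [x] (D ++ [b]) 0 0
              (by rw [bScan_congr pre D (D ++ [b]) 0 0 hco]; exact hI3)]
            simp [bScan, hbmem]
          · rw [mres_append pre [x] (D ++ [b]) 0 0,
              mres_congr pre D (D ++ [b]) 0 0 hco]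
            simp [mres, hbmem, hax]
        · have hblt : b < pre.length := by omega
          have hvalb : pre.getD (b - 0) 0 = a := by
            rw [Nat.sub_zero, haeq, hpre',
              List.getD_append (pre ++ [x]) rest₂ 0 b (by simp; omega),
              List.getD_append pre [x] 0 b (by omega)]
          have hadd := bScan_add b pre D 0 0 hI3 (by omega) (by omega) hb2
            (by rw [hvalb]; omega)
          have hpos' : pre.length ∉ D ++ [b] := by simp [hposD]; omega
          constructor
          · rw [bScan_append_none pre [x] (D ++ [b]) 0 0 hadd.1]
            have : ¬ (mres pre (D ++ [b]) 0 0 + x < 0) := by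
              rw [hadd.2, hvalb]
              rw [haeq]
              omega
            simp [bScan, hpos', this]
          · have h2 := hadd.2
            rw [hvalb] at h2
            rw [mres_append pre [x] (D ++ [b]) 0 0]
            simp only [mres, Nat.zero_add]
            rw [if_neg hpos', h2]
            ring
      have hq'' : ((q ++ [x]).erase a).Perm (ndNegs (pre ++ [x]) (D ++ [b]) 0) := by
        have hsplit := ndNegs_split b (pre ++ [x]) D 0 (by omega) (by omega) hb2
          (by rw [Nat.sub_zero, ← hgetp b (by omega)]; exact hmBneg)
        rw [Nat.sub_zero] at hsplit
        have hval : (pre ++ [x]).getD b 0 = a := by rw [haeq, hgetp b (by omega)]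
        rw [hval] at hsplit
        have h3 : (a :: ndNegs (pre ++ [x]) (D ++ [b]) 0).erase a
            = ndNegs (pre ++ [x]) (D ++ [b]) 0 :=
          List.erase_cons_head a (ndNegs (pre ++ [x]) (D ++ [b]) 0)
        exact (hq1.erase a).trans (h3 ▸ hsplit.erase a)
      have hIH := ih (pre ++ [x]) (D ++ [b]) ((q ++ [x]).erase a) f hI1' hnd'
        hscan'.1 hq'' (by simp at hfuel ⊢; omega)
      rw [hscan'.2] at hIH
      have hsum : (pre ++ [x]).sum = pre.sum + x := by simp
      rw [hsum] at hIH
      have harith : pre.sum + x - (mres pre D 0 0 + x - a)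
          = pre.sum - mres pre D 0 0 + a := by ring
      rw [harith] at hIH
      have hlen : ((D ++ [b]).length : Int) = (D.length : Int) + 1 := by
        simp
      rw [hlen] at hIH
      rw [← hpre'] at hIH
      -- A's step computes exactly that state
      have hstep : magicTowerStep ((D.length : Int), pre.sum - mres pre D 0 0,
          mres pre D 0 0, q) x
          = ((D.length : Int) + 1, pre.sum - mres pre D 0 0 + a,
             mres pre D 0 0 + x - a, (q ++ [x]).erase a) := by
        simp [magicTowerStep, hxneg, hx, hmin]
      rw [hstep, hIH]
      -- B's loop takes one iteration to the same deferred set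
      have hadd : PySem.Set.add D b = D ++ [b] := PySem.Set.add_of_not_mem hb2
      simp only [bLoop, hscanS, hR, hadd]
    · -- no deferral at this room
      have hscan' : bScan (pre ++ [x]) D 0 0 = none := by
        rw [bScan_append_none pre [x] D 0 0 hI3]
        simp [bScan, hposD, hx]
      have hmres' : mres (pre ++ [x]) D 0 0 = mres pre D 0 0 + x := by
        rw [mres_append pre [x] D 0 0]
        simp [mres, hposD]
      have hI1' : ∀ j ∈ D, j < (pre ++ [x]).length := by
        intro j hj; have := hI1 j hj; simp; omega
      have hq' : ∀ q', q'.Perm (ndNegs (pre ++ [x]) D 0) →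
          (List.foldl magicTowerStep ((D.length : Int),
            (pre ++ [x]).sum - mres (pre ++ [x]) D 0 0,
            mres (pre ++ [x]) D 0 0, q') rest₂).1
          = bLoop fuel (pre ++ x :: rest₂) D := by
        intro q' hq'
        have := ih (pre ++ [x]) D q' fuel hI1' hnd hscan' hq'
          (by simp at hfuel ⊢; omega)
        rwa [List.append_assoc, List.singleton_append] at this
      have hsum : (pre ++ [x]).sum = pre.sum + x := by simp
      by_cases hxn : x < 0
      · have hqx : (q ++ [x]).Perm (ndNegs (pre ++ [x]) D 0) := by
          rw [ndNegs_append]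
          have : ndNegs [x] D (0 + pre.length) = [x] := by
            simp [ndNegs, hposD, hxn]
          rw [this]
          exact List.Perm.append hq (List.Perm.refl [x])
        have hstep : magicTowerStep ((D.length : Int), pre.sum - mres pre D 0 0,
            mres pre D 0 0, q) x
            = ((D.length : Int), pre.sum - mres pre D 0 0,
               mres pre D 0 0 + x, q ++ [x]) := by
          simp [magicTowerStep, hxn, if_neg hx]
        rw [hstep]
        have := hq' (q ++ [x]) hqx
        rw [hmres', hsum] at this
        have harith : pre.sum + x - (mres pre D 0 0 + x) = pre.sum - mres pre D 0 0 := by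
          ring
        rwa [harith] at this
      · have hqx : q.Perm (ndNegs (pre ++ [x]) D 0) := by
          rw [ndNegs_append]
          have : ndNegs [x] D (0 + pre.length) = [] := by
            simp [ndNegs, hposD, hxn]
          rw [this]
          simpa using hq
        have hstep : magicTowerStep ((D.length : Int), pre.sum - mres pre D 0 0,
            mres pre D 0 0, q) x
            = ((D.length : Int), pre.sum - mres pre D 0 0,
               mres pre D 0 0 + x, q) := by
          simp [magicTowerStep, hxn]
        rw [hstep]
        have := hq' q hqx
        rw [hmres', hsum] at this
        have harith : pre.sum + x - (mres pre D 0 0 + x) = pre.sum - mres pre D 0 0 := by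
          ring
        rwa [harith] at this


-- ===== VERDICT (by name: the statement is the Claim_ definition above) =====
theorem magicTower_spec : Claim_equal_magicTower := by
  intro nums _
  unfold Spec_magicTower magicTower magicTower_alt
  have hs := currem nums (0, 0, 0, [])
  by_cases h : nums.sum < 0
  · simp only [hs]
    simp [h]
  · have hmain := main_lemma nums [] [] [] (nums.length + 1)
      (by simp) List.nodup_nil rfl (List.Perm.refl _) (le_refl _)
    simp only [hs]
    simp only [List.sum_nil, List.nil_append] at hmain ⊢
    simp [h]
    simpa [mres] using hmain
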